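-- pv_equiv track=rewrite | github.com/qsdrqs/dotfiles | tools/split_plugins.py | match_long_closer
-- ===== SOURCE A (Python) =====
-- def match_long_closer(source: str, pos: int, depth: int) -> int | None:
--     if source[pos] != "]":
--         return None
--     idx = pos + 1
--     count = 0
--     while idx < len(source) and source[idx] == "=":
--         count += 1
--         idx += 1
--     if count == depth and idx < len(source) and source[idx] == "]":
--         return idx + 1
--     return None
-- ===== SOURCE B (Python) =====
-- def match_long_closer(source: str, pos: int, depth: int) -> int | None:
--     if source[pos] != "]":
--         return None
--     if depth < 0 or depth + 2 > len(source):
--         return None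
--     expected = "]" + "=" * depth + "]"
--     if source.startswith(expected, pos):
--         return pos + len(expected)
--     return None
-- ===== Notes on version B (the rewrite author's own statement) =====
-- stated objective: simpler
-- what changed: B builds the expected closer ']' + '='*depth + ']' once and tests it with a single startswith at pos, replacing A's character-by-character while loop that counts '=' signs.
-- intended difference: For negative in-range pos where source[pos] is ']' and every character after it is '=', A's index-by-index scan wraps around to the start of the string (Python negative indexing) and may return a 'match' spanning the string's end and beginning; B returns None there, since no real long-bracket closer starts at pos, which is the intended behaviour. — e.g. on match_long_closer("=]", -1, 1): A returns some 2, B returns none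
import Mathlib
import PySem

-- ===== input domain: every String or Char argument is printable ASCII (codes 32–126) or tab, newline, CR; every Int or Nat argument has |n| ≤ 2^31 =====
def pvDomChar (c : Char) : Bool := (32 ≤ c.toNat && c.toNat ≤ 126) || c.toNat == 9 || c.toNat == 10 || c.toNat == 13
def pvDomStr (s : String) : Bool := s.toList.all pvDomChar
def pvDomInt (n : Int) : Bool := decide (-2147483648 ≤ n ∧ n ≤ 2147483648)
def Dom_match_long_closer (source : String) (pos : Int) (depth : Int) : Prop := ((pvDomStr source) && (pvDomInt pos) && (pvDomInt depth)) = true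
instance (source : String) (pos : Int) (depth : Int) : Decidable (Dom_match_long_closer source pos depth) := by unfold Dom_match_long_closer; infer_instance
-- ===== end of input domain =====

-- B replaces A's character-counting while loop by building the expected closer "]" + "="*depth + "]" once
-- and testing it with a single startswith at pos (objective: simpler).

-- ===== PORT A =====
-- the while loop of A: while idx < len(source) and source[idx] == "=": count += 1; idx += 1
-- (fuel-bounded structural recursion; fuel 2*len+2 exceeds the iteration count for every in-range pos)
def pvLoopA (cs : List Char) (idx count : Int) : Nat → Int × Int
  | 0 => (idx, count)
  | fuel + 1 =>
    if idx < (cs.length : Int) ∧ PySem.List.pyGet? cs idx = some '=' then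
      pvLoopA cs (idx + 1) (count + 1) fuel
    else (idx, count)

def match_long_closer (source : String) (pos : Int) (depth : Int) : Option Int :=
  match PySem.List.pyGet? source.toList pos with
  | none => none
  | some c =>
    if c ≠ ']' then none
    else
      let r := pvLoopA source.toList (pos + 1) 0 (source.toList.length * 2 + 2)
      if r.2 = depth ∧ r.1 < (source.toList.length : Int) ∧
         PySem.List.pyGet? source.toList r.1 = some ']' then
        some (r.1 + 1)
      else none

-- ===== PORT B =====
def match_long_closer_alt (source : String) (pos : Int) (depth : Int) : Option Int :=
  match PySem.List.pyGet? source.toList pos with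
  | none => none
  | some c =>
    if c ≠ ']' then none
    else if depth < 0 ∨ depth + 2 > (source.toList.length : Int) then none
    else
      let expected := ']' :: (List.replicate depth.toNat '=' ++ [']'])
      if expected.isPrefixOf (PySem.List.slice source.toList (some pos) none) then
        some (pos + (expected.length : Int))
      else none

-- ===== PRECONDITION & SPEC =====
-- Pre_ excludes exactly the inputs on which A raises IndexError at source[pos].
def Pre_match_long_closer (source : String) (pos : Int) (depth : Int) : Prop :=
  PySem.Raise.InRange source.toList.length pos
instance (source : String) (pos : Int) (depth : Int) : Decidable (Pre_match_long_closer source pos depth) := by unfold Pre_match_long_closer; infer_instance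
def pvWitness_match_long_closer : String × Int × Int := ("]=]", 0, 1)

-- For negative in-range pos where source[pos] is ']' and every character after it is '=', A's
-- index-by-index scan wraps around to the start of the string (Python negative indexing) and returns a
-- 'match' spanning the string's end and beginning; B returns None there, since no real long-bracket
-- closer starts at pos, which is the intended behaviour.
-- (D_ says exactly that: the scan must wrap, 0 < pos + depth + 2, and the closer is a prefix of the
-- wrapped-around reading of the string from pos.)
def D_match_long_closer (source : String) (pos : Int) (depth : Int) : Prop :=
  pos < 0 ∧ -pos < depth + 2 ∧
  ']' :: (List.replicate depth.toNat '=' ++ [']']) <+: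
    source.toList.drop ((source.toList.length : Int) + pos).toNat ++ source.toList
instance (source : String) (pos : Int) (depth : Int) : Decidable (D_match_long_closer source pos depth) := by unfold D_match_long_closer; infer_instance

def Spec_match_long_closer (source : String) (pos : Int) (depth : Int) (out : Option Int) : Prop := ¬ D_match_long_closer source pos depth → out = match_long_closer_alt source pos depth
instance (source : String) (pos : Int) (depth : Int) (out : Option Int) : Decidable (Spec_match_long_closer source pos depth out) := by unfold Spec_match_long_closer; infer_instance

def pvDiffWitness_match_long_closer : String × Int × Int := ("=]", -1, 1)
def pvDiffWitnessOut_match_long_closer : (Option Int) × (Option Int) := (some 2, none)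

-- ===== CLAIM (what is proved, stated in full; the proofs are below) =====
def Claim_unchanged_match_long_closer : Prop := ∀ (source : String) (pos : Int) (depth : Int), Dom_match_long_closer source pos depth → Pre_match_long_closer source pos depth → Spec_match_long_closer source pos depth (match_long_closer source pos depth)
def Claim_changed_match_long_closer : Prop := Dom_match_long_closer (pvDiffWitness_match_long_closer.1) (pvDiffWitness_match_long_closer.2.1) (pvDiffWitness_match_long_closer.2.2) ∧ Pre_match_long_closer (pvDiffWitness_match_long_closer.1) (pvDiffWitness_match_long_closer.2.1) (pvDiffWitness_match_long_closer.2.2) ∧ D_match_long_closer (pvDiffWitness_match_long_closer.1) (pvDiffWitness_match_long_closer.2.1) (pvDiffWitness_match_long_closer.2.2) ∧ match_long_closer (pvDiffWitness_match_long_closer.1) (pvDiffWitness_match_long_closer.2.1) (pvDiffWitness_match_long_closer.2.2) = pvDiffWitnessOut_match_long_closer.1 ∧ match_long_closer_alt (pvDiffWitness_match_long_closer.1) (pvDiffWitness_match_long_closer.2.1) (pvDiffWitness_match_long_closer.2.2) = pvDiffWitnessOut_match_long_closer.2 ∧ pvDiffWitnessOut_match_long_closer.1 ≠ pvDiffWi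tnessOut_match_long_closer.2
def Claim_exact_match_long_closer : Prop := ∀ (source : String) (pos : Int) (depth : Int), Dom_match_long_closer source pos depth → Pre_match_long_closer source pos depth → D_match_long_closer source pos depth → match_long_closer source pos depth ≠ match_long_closer_alt source pos depth

-- ===== LEMMAS AND PROOFS =====
def pvEqRun : List Char → Nat
  | [] => 0
  | c :: cs => if c = '=' then pvEqRun cs + 1 else 0

lemma pvEqRun_le (cs : List Char) : pvEqRun cs ≤ cs.length := by
  induction cs with
  | nil => simp [pvEqRun]
  | cons c t ih =>
    by_cases h : c = '='
    · simp [pvEqRun, h]; omega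
    · simp [pvEqRun, h]

lemma pvEqRun_eq_length_iff (cs : List Char) :
    pvEqRun cs = cs.length ↔ cs.all (· = '=') = true := by
  induction cs with
  | nil => simp [pvEqRun]
  | cons c t ih =>
    by_cases h : c = '='
    · simp [pvEqRun, h, ih]
    · simp [pvEqRun, h]

lemma pvEqRun_append (xs ys : List Char) :
    pvEqRun (xs ++ ys) =
      if xs.all (· = '=') = true then xs.length + pvEqRun ys else pvEqRun xs := by
  induction xs with
  | nil => simp
  | cons c t ih =>
    by_cases h : c = '='
    · by_cases ht : t.all (· = '=') = true
      · simp [pvEqRun, h, ih, ht]; omega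
      · simp [pvEqRun, h, ih, ht]
    · simp [pvEqRun, h]

lemma pvLoopA_count_le (cs : List Char) : ∀ (fuel : Nat) (idx count : Int),
    count ≤ (pvLoopA cs idx count fuel).2 := by
  intro fuel
  induction fuel with
  | zero => intro idx count; simp [pvLoopA]
  | succ f ih =>
    intro idx count
    simp only [pvLoopA]
    split
    · exact le_trans (by omega) (ih _ _)
    · simp

lemma pvLoopA_pos (cs : List Char) : ∀ (fuel i : Nat) (count : Int),
    pvEqRun (cs.drop i) < fuel →
    pvLoopA cs (i : Int) count fuel =
      ((i : Int) + (pvEqRun (cs.drop i) : Int), count + (pvEqRun (cs.drop i) : Int)) := by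
  intro fuel
  induction fuel with
  | zero => intro i count h; omega
  | succ f ih =>
    intro i count h
    by_cases hi : i < cs.length
    · have hd := List.drop_eq_getElem_cons hi
      by_cases hc : cs[i] = '='
      · have hrun : pvEqRun (cs.drop i) = pvEqRun (cs.drop (i + 1)) + 1 := by
          rw [hd]; simp [pvEqRun, hc]
        have hg : PySem.List.pyGet? cs (i : Int) = some '=' := by
          rw [PySem.List.pyGet?_natCast]
          exact List.getElem?_eq_some_iff.mpr ⟨hi, hc⟩
        simp only [pvLoopA]
        rw [if_pos ⟨by exact_mod_cast hi, hg⟩]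
        have hcast : (i : Int) + 1 = ((i + 1 : Nat) : Int) := by push_cast; ring
        rw [hcast, ih (i + 1) (count + 1) (by omega), hrun]
        simp only [Prod.mk.injEq]
        omega
      · have hg : PySem.List.pyGet? cs (i : Int) = some cs[i] := by
          rw [PySem.List.pyGet?_natCast]
          exact List.getElem?_eq_some_iff.mpr ⟨hi, rfl⟩
        have hrun : pvEqRun (cs.drop i) = 0 := by rw [hd]; simp [pvEqRun, hc]
        simp only [pvLoopA]
        rw [if_neg (by rintro ⟨-, hx⟩; rw [hg] at hx; exact hc (Option.some.inj hx))]
        rw [hrun]; simp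
    · have hd : cs.drop i = [] := List.drop_eq_nil_of_le (by omega)
      have hrun : pvEqRun (cs.drop i) = 0 := by rw [hd]; rfl
      simp only [pvLoopA]
      rw [if_neg (by rintro ⟨hx, -⟩; exact hi (by exact_mod_cast hx))]
      rw [hrun]; simp

lemma pvLoopA_neg (cs : List Char) : ∀ (k : Nat) (fuel : Nat) (count : Int),
    1 ≤ k → k ≤ cs.length → k ≤ fuel →
    pvLoopA cs (-(k : Int)) count fuel =
      if pvEqRun (cs.drop (cs.length - k)) < k then
        (-(k : Int) + (pvEqRun (cs.drop (cs.length - k)) : Int),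
         count + (pvEqRun (cs.drop (cs.length - k)) : Int))
      else pvLoopA cs 0 (count + (k : Int)) (fuel - k) := by
  intro k
  induction k with
  | zero => omega
  | succ k ih =>
    intro fuel count h1 hk hf
    obtain ⟨f, rfl⟩ : ∃ f, fuel = f + 1 := ⟨fuel - 1, by omega⟩
    have hlt : cs.length - (k + 1) < cs.length := by omega
    have hd := List.drop_eq_getElem_cons hlt
    have hidx : cs.length - (k + 1) + 1 = cs.length - k := by omega
    rw [hidx] at hd
    have hg : PySem.List.pyGet? cs (-((k + 1 : Nat) : Int)) = some cs[cs.length - (k + 1)] := by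
      rw [PySem.List.pyGet?_neg_natCast cs (k + 1) (by omega) hk]
      exact List.getElem?_eq_some_iff.mpr ⟨hlt, rfl⟩
    by_cases hc : cs[cs.length - (k + 1)] = '='
    · have hrun : pvEqRun (cs.drop (cs.length - (k + 1))) = pvEqRun (cs.drop (cs.length - k)) + 1 := by
        rw [hd]; simp [pvEqRun, hc]
      simp only [pvLoopA]
      rw [if_pos ⟨by push_cast; omega, by rw [hg, hc]⟩]
      by_cases hk0 : k = 0
      · subst hk0
        rw [if_neg (by rw [hrun]; omega)]
        have h0 : -((0 + 1 : Nat) : Int) + 1 = (0 : Int) := by norm_num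
        rw [h0]
        norm_num
      · have hstep : -((k + 1 : Nat) : Int) + 1 = -((k : Nat) : Int) := by push_cast; ring
        rw [hstep, ih f (count + 1) (by omega) (by omega) (by omega)]
        rw [hrun]
        by_cases hb : pvEqRun (cs.drop (cs.length - k)) < k
        · rw [if_pos hb, if_pos (by omega)]
          simp only [Prod.mk.injEq]
          omega
        · rw [if_neg hb, if_neg (by omega)]
          congr 1
          · push_cast; ring
          · omega
    · have hrun : pvEqRun (cs.drop (cs.length - (k + 1))) = 0 := by rw [hd]; simp [pvEqRun, hc]
      simp only [pvLoopA]
      rw [if_neg (by rintro ⟨-, hx⟩; rw [hg] at hx; exact hc (Option.some.inj hx))]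
      rw [if_pos (by omega), hrun]
      simp

lemma pvPrefix_iff (d : Nat) : ∀ (rest : List Char),
    (List.replicate d '=' ++ [']'] <+: rest) ↔ (pvEqRun rest = d ∧ rest[d]? = some ']') := by
  induction d with
  | zero =>
    intro rest
    cases rest with
    | nil => simp [pvEqRun]
    | cons c t =>
      simp only [List.replicate_zero, List.nil_append, List.cons_prefix_cons, List.nil_prefix,
        and_true, List.getElem?_cons_zero, Option.some.injEq, pvEqRun]
      constructor
      · rintro rfl; simp
      · rintro ⟨-, rfl⟩; simp
  | succ d ih =>
    intro rest
    cases rest with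
    | nil => simp [pvEqRun]
    | cons c t =>
      simp only [List.replicate_succ, List.cons_append, List.cons_prefix_cons]
      by_cases hc : c = '='
      · subst hc
        constructor
        · rintro ⟨-, hp⟩
          obtain ⟨h1, h2⟩ := (ih t).mp hp
          exact ⟨by simp [pvEqRun, h1], by simpa using h2⟩
        · rintro ⟨h1, h2⟩
          refine ⟨rfl, (ih t).mpr ⟨?_, by simpa using h2⟩⟩
          simp [pvEqRun] at h1
          omega
      · constructor
        · rintro ⟨h, -⟩; exact absurd h.symm hc
        · rintro ⟨h, -⟩; simp [pvEqRun, hc] at h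

-- D_ (the short prefix-of-the-wrapped-string condition), characterised for the proof:
lemma pvD_iff (source : String) (pos depth : Int)
    (hpre : PySem.Raise.InRange source.toList.length pos) :
    D_match_long_closer source pos depth ↔
      (pos < 0 ∧ 0 ≤ (source.toList.length : Int) + pos ∧
       source.toList[((source.toList.length : Int) + pos).toNat]? = some ']' ∧
       (source.toList.drop (((source.toList.length : Int) + pos).toNat + 1)).all (· = '=') = true ∧
       (-1 - pos) + (pvEqRun source.toList : Int) = depth ∧
       pvEqRun source.toList < source.toList.length ∧
       source.toList[pvEqRun source.toList]? = some ']') := by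
  obtain ⟨h1, h2⟩ := hpre
  unfold D_match_long_closer
  constructor
  · rintro ⟨hp, hw, hpf⟩
    have hd : ((((source.toList.length : Int) + pos).toNat : Int))
        = (source.toList.length : Int) + pos := by omega
    have hdlt : ((source.toList.length : Int) + pos).toNat < source.toList.length := by omega
    have hcons := List.drop_eq_getElem_cons hdlt
    rw [hcons] at hpf
    simp only [List.cons_append, List.cons_prefix_cons] at hpf
    obtain ⟨hc1, hp2⟩ := hpf
    rw [pvPrefix_iff] at hp2
    obtain ⟨hrun2, hget2⟩ := hp2
    rw [pvEqRun_append] at hrun2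
    have hm : (source.toList.drop (((source.toList.length : Int) + pos).toNat + 1)).length
        = source.toList.length - (((source.toList.length : Int) + pos).toNat + 1) := by
      simp
    have hrle := pvEqRun_le (source.toList.drop (((source.toList.length : Int) + pos).toNat + 1))
    by_cases hall : (source.toList.drop (((source.toList.length : Int) + pos).toNat + 1)).all
        (· = '=') = true
    · rw [if_pos hall] at hrun2
      have hget3 : source.toList[pvEqRun source.toList]? = some ']' := by
        rw [List.getElem?_append_right (by omega)] at hget2
        have hix : depth.toNat -
            (source.toList.drop (((source.toList.length : Int) + pos).toNat + 1)).length
            = pvEqRun source.toList := by omega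
        rwa [hix] at hget2
      have hrlt := (List.getElem?_eq_some_iff.mp hget3).1
      exact ⟨hp, by omega, List.getElem?_eq_some_iff.mpr ⟨hdlt, hc1.symm⟩, hall,
        by omega, hrlt, hget3⟩
    · rw [if_neg hall] at hrun2
      exfalso
      have hne := (not_iff_not.mpr (pvEqRun_eq_length_iff
        (source.toList.drop (((source.toList.length : Int) + pos).toNat + 1)))).mpr hall
      omega
  · rintro ⟨hp, hnn, hgd, hall, hdep, hrlt, hgr⟩
    have hd : ((((source.toList.length : Int) + pos).toNat : Int))
        = (source.toList.length : Int) + pos := by omega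
    have hdlt : ((source.toList.length : Int) + pos).toNat < source.toList.length := by omega
    refine ⟨hp, by omega, ?_⟩
    have hcons := List.drop_eq_getElem_cons hdlt
    obtain ⟨hlt0, hcd⟩ := List.getElem?_eq_some_iff.mp hgd
    rw [hcons, hcd]
    refine List.cons_prefix_cons.mpr ⟨rfl, (pvPrefix_iff _ _).mpr ⟨?_, ?_⟩⟩
    · simp only [List.append_eq]
      rw [pvEqRun_append, if_pos hall]
      simp only [List.length_drop]
      omega
    · simp only [List.append_eq]
      rw [List.getElem?_append_right (by simp only [List.length_drop]; omega)]
      have hix : depth.toNat -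
          (source.toList.drop (((source.toList.length : Int) + pos).toNat + 1)).length
          = pvEqRun source.toList := by simp only [List.length_drop]; omega
      rw [hix]; exact hgr

lemma pvAlt_eval (source : String) (pos depth : Int) (s : Nat)
    (hget : PySem.List.pyGet? source.toList pos = some ']')
    (hd0 : ¬ depth < 0)
    (hslice : PySem.List.slice source.toList (some pos) none = source.toList.drop s)
    (hcons : source.toList.drop s = ']' :: source.toList.drop (s + 1)) :
    match_long_closer_alt source pos depth =
      if pvEqRun (source.toList.drop (s + 1)) = depth.toNat ∧
         (source.toList.drop (s + 1))[depth.toNat]? = some ']'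
      then some (pos + ((depth.toNat : Int) + 2)) else none := by
  simp only [match_long_closer_alt, hget]
  rw [if_neg (by simp)]
  by_cases hbig : depth + 2 > (source.toList.length : Int)
  · rw [if_pos (Or.inr hbig), if_neg (by
      rintro ⟨-, hy⟩
      have hlt := (List.getElem?_eq_some_iff.mp hy).1
      simp only [List.length_drop] at hlt
      omega)]
  rw [if_neg (by omega), hslice, hcons]
  by_cases hco : pvEqRun (source.toList.drop (s + 1)) = depth.toNat ∧
      (source.toList.drop (s + 1))[depth.toNat]? = some ']'
  · rw [if_pos (List.isPrefixOf_iff_prefix.mpr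
        (List.cons_prefix_cons.mpr ⟨rfl, (pvPrefix_iff depth.toNat _).mpr hco⟩)),
      if_pos hco]
    have hlen : (']' :: (List.replicate depth.toNat '=' ++ [']'])).length = depth.toNat + 2 := by
      simp
    rw [hlen]
    congr 1
  · have hpf : ¬ ((']' :: (List.replicate depth.toNat '=' ++ [']'])).isPrefixOf
        (']' :: source.toList.drop (s + 1)) = true) := fun h =>
      hco ((pvPrefix_iff depth.toNat _).mp
        (List.cons_prefix_cons.mp (List.isPrefixOf_iff_prefix.mp h)).2)
    rw [if_neg hpf, if_neg hco]

lemma pvMain (source : String) (pos depth : Int)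
    (hpre : PySem.Raise.InRange source.toList.length pos) :
    (D_match_long_closer source pos depth →
       match_long_closer source pos depth = some ((pvEqRun source.toList : Int) + 1) ∧
       match_long_closer_alt source pos depth = none) ∧
    (¬ D_match_long_closer source pos depth →
       match_long_closer source pos depth = match_long_closer_alt source pos depth) := by
  obtain ⟨h1, h2⟩ := id hpre
  obtain ⟨c, hc⟩ : ∃ c, PySem.List.pyGet? source.toList pos = some c := by
    cases hx : PySem.List.pyGet? source.toList pos with
    | none => exact absurd ⟨h1, h2⟩ ((PySem.List.pyGet?_eq_none_iff _ _).mp hx)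
    | some c => exact ⟨c, rfl⟩
  by_cases hcc : c = ']'
  case neg =>
    have hA : match_long_closer source pos depth = none := by
      simp only [match_long_closer, hc]
      rw [if_pos hcc]
    have hB : match_long_closer_alt source pos depth = none := by
      simp only [match_long_closer_alt, hc]
      rw [if_pos hcc]
    refine ⟨fun hD => ?_, fun _ => by rw [hA, hB]⟩
    exfalso
    rw [pvD_iff _ _ _ hpre] at hD
    obtain ⟨hD1, hD2, hD3, -, -, -, -⟩ := hD
    have hk : pos = -(((-pos).toNat : Nat) : Int) := by omega
    have hnk : ((source.toList.length : Int) + pos).toNat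
        = source.toList.length - (-pos).toNat := by omega
    rw [hk, PySem.List.pyGet?_neg_natCast source.toList (-pos).toNat (by omega) (by omega)] at hc
    rw [hnk] at hD3
    rw [hD3] at hc
    exact hcc (Option.some.inj hc).symm
  case pos =>
    subst hcc
    by_cases hneg : depth < 0
    · have hB : match_long_closer_alt source pos depth = none := by
        simp only [match_long_closer_alt, hc]
        rw [if_neg (by simp), if_pos (Or.inl hneg)]
      have hge := pvLoopA_count_le source.toList (source.toList.length * 2 + 2) (pos + 1) 0
      have hA : match_long_closer source pos depth = none := by
        simp only [match_long_closer, hc]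
        rw [if_neg (by simp), if_neg (by rintro ⟨hx, -⟩; omega)]
      refine ⟨fun hD => ?_, fun _ => by rw [hA, hB]⟩
      exfalso
      rw [pvD_iff _ _ _ hpre] at hD
      obtain ⟨hD1, -, -, -, hD5, -, -⟩ := hD
      omega
    · by_cases hp : 0 ≤ pos
      · -- nonnegative pos: no wraparound, D_ cannot hold
        lift pos to Nat using hp with p
        have hcg : source.toList[p]? = some ']' := by
          rw [PySem.List.pyGet?_natCast] at hc; exact hc
        obtain ⟨hplen, hpch⟩ := List.getElem?_eq_some_iff.mp hcg
        have hdcons : source.toList.drop p = ']' :: source.toList.drop (p + 1) := by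
          have hx := List.drop_eq_getElem_cons hplen
          rw [hpch] at hx; exact hx
        have hND : ¬ D_match_long_closer source (p : Int) depth := by
          rw [pvD_iff _ _ _ hpre]
          rintro ⟨hx, -⟩
          omega
        refine ⟨fun hD => absurd hD hND, fun _ => ?_⟩
        have hslice : PySem.List.slice source.toList (some (p : Int)) none
            = source.toList.drop p := by
          rw [PySem.List.slice_from _ (Int.natCast_nonneg p)]
          norm_num
        have hBe := pvAlt_eval source (p : Int) depth p hc hneg hslice hdcons
        have hfuel : pvEqRun (source.toList.drop (p + 1)) < source.toList.length * 2 + 2 := by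
          have hx := pvEqRun_le (source.toList.drop (p + 1))
          simp only [List.length_drop] at hx
          omega
        have hloop := pvLoopA_pos source.toList (source.toList.length * 2 + 2) (p + 1) 0 hfuel
        have hcast1 : (p : Int) + 1 = ((p + 1 : Nat) : Int) := by push_cast; ring
        have hgd : (source.toList.drop (p + 1))[depth.toNat]?
            = source.toList[p + 1 + depth.toNat]? := by
          rw [List.getElem?_drop]
        by_cases hR : ((pvEqRun (source.toList.drop (p + 1)) : Nat) : Int) = depth
        · have hRd : depth.toNat = pvEqRun (source.toList.drop (p + 1)) := by omega
          by_cases hch : source.toList[p + 1 + pvEqRun (source.toList.drop (p + 1))]? = some ']'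
          · have hlt : p + 1 + pvEqRun (source.toList.drop (p + 1)) < source.toList.length :=
              (List.getElem?_eq_some_iff.mp hch).1
            rw [hBe, if_pos ⟨by omega, by rw [hgd, hRd]; exact hch⟩]
            simp only [match_long_closer, hc]
            rw [if_neg (by simp), hcast1, hloop]
            dsimp only
            rw [if_pos ⟨by omega, by push_cast; omega, by
              rw [show ((p + 1 : Nat) : Int) + (pvEqRun (source.toList.drop (p + 1)) : Int)
                  = ((p + 1 + pvEqRun (source.toList.drop (p + 1)) : Nat) : Int) by push_cast; ring,
                PySem.List.pyGet?_natCast]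
              exact hch⟩]
            congr 1
            push_cast
            omega
          · rw [hBe, if_neg (by rintro ⟨-, hx⟩; rw [hgd, hRd] at hx; exact hch hx)]
            simp only [match_long_closer, hc]
            rw [if_neg (by simp), hcast1, hloop]
            dsimp only
            rw [if_neg (by
              rintro ⟨-, -, hx⟩
              rw [show ((p + 1 : Nat) : Int) + (pvEqRun (source.toList.drop (p + 1)) : Int)
                  = ((p + 1 + pvEqRun (source.toList.drop (p + 1)) : Nat) : Int) by push_cast; ring,
                PySem.List.pyGet?_natCast] at hx
              exact hch hx)]
        · rw [hBe, if_neg (by rintro ⟨hx, -⟩; omega)]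
          simp only [match_long_closer, hc]
          rw [if_neg (by simp), hcast1, hloop]
          dsimp only
          rw [if_neg (by rintro ⟨hx, -⟩; omega)]
      · -- negative pos
        obtain ⟨k, hk1, hkn, rfl⟩ :
            ∃ k : Nat, 1 ≤ k ∧ k ≤ source.toList.length ∧ pos = -(k : Int) :=
          ⟨(-pos).toNat, by omega, by omega, by omega⟩
        have hcg : source.toList[source.toList.length - k]? = some ']' := by
          rw [PySem.List.pyGet?_neg_natCast source.toList k (by omega) hkn] at hc
          exact hc
        obtain ⟨hplen, hpch⟩ := List.getElem?_eq_some_iff.mp hcg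
        have hdcons : source.toList.drop (source.toList.length - k)
            = ']' :: source.toList.drop (source.toList.length - k + 1) := by
          have hx := List.drop_eq_getElem_cons hplen
          rw [hpch] at hx; exact hx
        have hslice : PySem.List.slice source.toList (some (-(k : Int))) none
            = source.toList.drop (source.toList.length - k) := by
          rw [PySem.List.slice_some_none, PySem.List.clampIdx_neg_natCast source.toList.length k (by omega)]
        have hBe := pvAlt_eval source (-(k : Int)) depth (source.toList.length - k)
          hc hneg hslice hdcons
        have hrlen : (source.toList.drop (source.toList.length - k + 1)).length = k - 1 := by
          simp only [List.length_drop]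
          omega
        have hRle : pvEqRun (source.toList.drop (source.toList.length - k + 1)) ≤ k - 1 := by
          have hx := pvEqRun_le (source.toList.drop (source.toList.length - k + 1))
          omega
        have hnn : ((source.toList.length : Int) + -(k : Int)).toNat
            = source.toList.length - k := by omega
        by_cases hk1' : k = 1
        · -- pos = -1 : the scan starts at index 0 (wrap)
          subst hk1'
          have hrest : source.toList.drop (source.toList.length - 1 + 1) = [] := by
            rw [show source.toList.length - 1 + 1 = source.toList.length by omega]
            exact List.drop_length
          have hBnone : match_long_closer_alt source (-(1 : Nat) : Int) depth = none := by
            rw [hBe, if_neg (by rintro ⟨-, hx⟩; rw [hrest] at hx; simp at hx)]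
          have hfuel : pvEqRun (source.toList.drop 0) < source.toList.length * 2 + 2 := by
            have hx := pvEqRun_le (source.toList.drop 0)
            simp only [List.length_drop] at hx
            omega
          have hloop := pvLoopA_pos source.toList (source.toList.length * 2 + 2) 0 0 hfuel
          rw [List.drop_zero] at hloop
          have hstep : -((1 : Nat) : Int) + 1 = ((0 : Nat) : Int) := by norm_num
          by_cases hcond : ((pvEqRun source.toList : Nat) : Int) = depth ∧
              pvEqRun source.toList < source.toList.length ∧
              source.toList[pvEqRun source.toList]? = some ']'
          · have hD : D_match_long_closer source (-(1 : Nat) : Int) depth := by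
              rw [pvD_iff _ _ _ hpre]
              refine ⟨by omega, by omega, ?_, ?_, by omega, hcond.2.1, hcond.2.2⟩
              · rw [show (((source.toList.length : Int) + -((1 : Nat) : Int)).toNat)
                      = source.toList.length - 1 by omega]
                exact hcg
              · rw [show (((source.toList.length : Int) + -((1 : Nat) : Int)).toNat + 1)
                      = source.toList.length - 1 + 1 by omega, hrest]
                rfl
            have hA : match_long_closer source (-(1 : Nat) : Int) depth
                = some ((pvEqRun source.toList : Int) + 1) := by
              simp only [match_long_closer, hc]
              rw [if_neg (by simp), hstep, hloop]
              dsimp only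
              rw [if_pos ⟨by omega, by have := hcond.2.1; push_cast; omega, by
                rw [show ((0 : Nat) : Int) + (pvEqRun source.toList : Int)
                    = ((pvEqRun source.toList : Nat) : Int) by push_cast; ring,
                  PySem.List.pyGet?_natCast]
                exact hcond.2.2⟩]
              congr 1
              push_cast
              ring
            exact ⟨fun _ => ⟨hA, hBnone⟩, fun hnD => absurd hD hnD⟩
          · have hND : ¬ D_match_long_closer source (-(1 : Nat) : Int) depth := by
              rw [pvD_iff _ _ _ hpre]
              rintro ⟨-, -, -, -, hx5, hx6, hx7⟩
              exact hcond ⟨by omega, hx6, hx7⟩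
            have hA : match_long_closer source (-(1 : Nat) : Int) depth = none := by
              simp only [match_long_closer, hc]
              rw [if_neg (by simp), hstep, hloop]
              dsimp only
              rw [if_neg (by
                rintro ⟨hx, hy, hz⟩
                rw [show ((0 : Nat) : Int) + (pvEqRun source.toList : Int)
                    = ((pvEqRun source.toList : Nat) : Int) by push_cast; ring,
                  PySem.List.pyGet?_natCast] at hz
                exact hcond ⟨by omega, (List.getElem?_eq_some_iff.mp hz).1, hz⟩)]
            exact ⟨fun hD => absurd hD hND, fun _ => by rw [hA, hBnone]⟩
        · -- k ≥ 2 : the scan starts at a negative index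
          have hk2 : 2 ≤ k := by omega
          have hstep : -((k : Nat) : Int) + 1 = -(((k - 1 : Nat)) : Int) := by omega
          have hloopn := pvLoopA_neg source.toList (k - 1)
            (source.toList.length * 2 + 2) 0 (by omega) (by omega) (by omega)
          rw [show source.toList.length - (k - 1) = source.toList.length - k + 1 by omega]
            at hloopn
          by_cases hwrap : pvEqRun (source.toList.drop (source.toList.length - k + 1)) < k - 1
          · -- no wraparound: the '=' run ends before the end of the string
            rw [if_pos hwrap] at hloopn
            have hND : ¬ D_match_long_closer source (-(k : Int)) depth := by
              rw [pvD_iff _ _ _ hpre]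
              rintro ⟨-, -, -, h4, -, -, -⟩
              rw [show (((source.toList.length : Int) + -(k : Int)).toNat + 1)
                  = source.toList.length - k + 1 by omega] at h4
              have hx := (pvEqRun_eq_length_iff
                (source.toList.drop (source.toList.length - k + 1))).mpr h4
              omega
            refine ⟨fun hD => absurd hD hND, fun _ => ?_⟩
            have hgd : (source.toList.drop (source.toList.length - k + 1))[depth.toNat]?
                = source.toList[source.toList.length - k + 1 + depth.toNat]? := by
              rw [List.getElem?_drop]
            by_cases hR : ((pvEqRun (source.toList.drop (source.toList.length - k + 1)) : Nat) : Int)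
                = depth
            · have hRd : depth.toNat
                  = pvEqRun (source.toList.drop (source.toList.length - k + 1)) := by omega
              have hidx2 : -(((k - 1 : Nat)) : Int)
                    + (pvEqRun (source.toList.drop (source.toList.length - k + 1)) : Int)
                  = -(((k - 1 - pvEqRun (source.toList.drop (source.toList.length - k + 1)) : Nat))
                      : Int) := by omega
              have hgetA : PySem.List.pyGet? source.toList
                    (-(((k - 1 : Nat)) : Int)
                      + (pvEqRun (source.toList.drop (source.toList.length - k + 1)) : Int))
                  = source.toList[source.toList.length - k + 1
                      + pvEqRun (source.toList.drop (source.toList.length - k + 1))]? := by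
                rw [hidx2, PySem.List.pyGet?_neg_natCast source.toList _ (by omega) (by omega)]
                congr 1
                omega
              by_cases hch : source.toList[source.toList.length - k + 1
                  + pvEqRun (source.toList.drop (source.toList.length - k + 1))]? = some ']'
              · rw [hBe, if_pos ⟨by omega, by rw [hgd, hRd]; exact hch⟩]
                simp only [match_long_closer, hc]
                rw [if_neg (by simp), hstep, hloopn]
                dsimp only
                rw [if_pos ⟨by omega, by omega, by rw [hgetA]; exact hch⟩]
                congr 1
                omega
              · rw [hBe, if_neg (by rintro ⟨-, hx⟩; rw [hgd, hRd] at hx; exact hch hx)]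
                simp only [match_long_closer, hc]
                rw [if_neg (by simp), hstep, hloopn]
                dsimp only
                rw [if_neg (by rintro ⟨-, -, hx⟩; rw [hgetA] at hx; exact hch hx)]
            · rw [hBe, if_neg (by rintro ⟨hx, -⟩; omega)]
              simp only [match_long_closer, hc]
              rw [if_neg (by simp), hstep, hloopn]
              dsimp only
              rw [if_neg (by rintro ⟨hx, -⟩; omega)]
          · -- wraparound: everything after pos is '=', the scan continues at index 0
            have hReq : pvEqRun (source.toList.drop (source.toList.length - k + 1)) = k - 1 := by
              omega
            rw [if_neg hwrap] at hloopn
            have hBnone : match_long_closer_alt source (-(k : Int)) depth = none := by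
              rw [hBe, if_neg]
              rintro ⟨hx, hy⟩
              rw [show depth.toNat
                  = (source.toList.drop (source.toList.length - k + 1)).length by omega] at hy
              rw [List.getElem?_eq_none (le_refl _)] at hy
              simp at hy
            have hfuel2 : pvEqRun (source.toList.drop 0)
                < source.toList.length * 2 + 2 - (k - 1) := by
              have hx := pvEqRun_le (source.toList.drop 0)
              simp only [List.length_drop] at hx
              omega
            have hloop2 := pvLoopA_pos source.toList
              (source.toList.length * 2 + 2 - (k - 1)) 0 (0 + ((k - 1 : Nat) : Int)) hfuel2
            simp only [Nat.cast_zero, List.drop_zero] at hloop2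
            rw [hloop2] at hloopn
            by_cases hcond : (((k - 1 : Nat)) : Int) + (pvEqRun source.toList : Int) = depth ∧
                pvEqRun source.toList < source.toList.length ∧
                source.toList[pvEqRun source.toList]? = some ']'
            · have hD : D_match_long_closer source (-(k : Int)) depth := by
                rw [pvD_iff _ _ _ hpre]
                refine ⟨by omega, by omega, ?_, ?_, by omega, hcond.2.1, hcond.2.2⟩
                · rw [hnn]; exact hcg
                · rw [show (((source.toList.length : Int) + -(k : Int)).toNat + 1)
                      = source.toList.length - k + 1 by omega]
                  exact (pvEqRun_eq_length_iff _).mp (by omega)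
              have hA : match_long_closer source (-(k : Int)) depth
                  = some ((pvEqRun source.toList : Int) + 1) := by
                simp only [match_long_closer, hc]
                rw [if_neg (by simp), hstep, hloopn]
                dsimp only
                rw [if_pos ⟨by omega, by
                    have := hcond.2.1
                    omega, by
                  rw [show (0 : Int) + (pvEqRun source.toList : Int)
                      = ((pvEqRun source.toList : Nat) : Int) by ring,
                    PySem.List.pyGet?_natCast]
                  exact hcond.2.2⟩]
                congr 1
                ring
              exact ⟨fun _ => ⟨hA, hBnone⟩, fun hnD => absurd hD hnD⟩
            · have hND : ¬ D_match_long_closer source (-(k : Int)) depth := by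
                rw [pvD_iff _ _ _ hpre]
                rintro ⟨-, -, -, -, hx5, hx6, hx7⟩
                exact hcond ⟨by omega, hx6, hx7⟩
              have hA : match_long_closer source (-(k : Int)) depth = none := by
                simp only [match_long_closer, hc]
                rw [if_neg (by simp), hstep, hloopn]
                dsimp only
                rw [if_neg (by
                  rintro ⟨hx, hy, hz⟩
                  rw [show (0 : Int) + (pvEqRun source.toList : Int)
                      = ((pvEqRun source.toList : Nat) : Int) by ring,
                    PySem.List.pyGet?_natCast] at hz
                  exact hcond ⟨by omega, (List.getElem?_eq_some_iff.mp hz).1, hz⟩)]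
              exact ⟨fun hD => absurd hD hND, fun _ => by rw [hA, hBnone]⟩

-- ===== VERDICT (by name: the statements are the Claim_ definitions above) =====
theorem match_long_closer_spec : Claim_unchanged_match_long_closer := by
  intro source pos depth _ hPre hnD
  exact (pvMain source pos depth hPre).2 hnD

theorem match_long_closer_changed : Claim_changed_match_long_closer := by
  unfold Claim_changed_match_long_closer; decide

theorem match_long_closer_tight : Claim_exact_match_long_closer := by
  intro source pos depth _ hPre hD
  have h := (pvMain source pos depth hPre).1 hD
  rw [h.1, h.2]
  simp
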